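-- pv_equiv track=rewrite | github.com/vlollier/oligator | src/MassSpectrometry.py | casse_cycle
-- ===== SOURCE A (Python) =====
-- def casse_cycle(path):
--     """
--     """
--     ncc=len(path)
--     points=[]
--     edges=[]
--     for i in range(0,ncc-1):
--         for j in range(i+1,ncc):
--             points.append([i,j])
--
--     for p in points:
--         edge1=(path[p[0]],path[p[0]+1])
--         if p[1]==ncc-1:
--             edge2=(path[p[1]],path[0])
--         else:
--             edge2=(path[p[1]],path[p[1]+1])
--
--         edges.append([edge1,edge2])
--
--     return edges
-- ===== SOURCE B (Python) =====
-- def casse_cycle(path):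
--     edges = list(zip(path, path[1:] + path[:1]))
--
--     def pairs(es):
--         if not es:
--             return []
--         head, tail = es[0], es[1:]
--         return [[head, e] for e in tail] + pairs(tail)
--
--     return pairs(edges)
-- ===== Notes on version B (the rewrite author's own statement) =====
-- stated objective: alternative
-- what changed: B is index-free: it builds the cycle's edge list by zipping the path with its one-step rotation (path[1:] + path[:1]) and then pairs edges by structural recursion on suffixes of that list, instead of A's nested index ranges, points list and per-pair wraparound branch.
import Mathlib
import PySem

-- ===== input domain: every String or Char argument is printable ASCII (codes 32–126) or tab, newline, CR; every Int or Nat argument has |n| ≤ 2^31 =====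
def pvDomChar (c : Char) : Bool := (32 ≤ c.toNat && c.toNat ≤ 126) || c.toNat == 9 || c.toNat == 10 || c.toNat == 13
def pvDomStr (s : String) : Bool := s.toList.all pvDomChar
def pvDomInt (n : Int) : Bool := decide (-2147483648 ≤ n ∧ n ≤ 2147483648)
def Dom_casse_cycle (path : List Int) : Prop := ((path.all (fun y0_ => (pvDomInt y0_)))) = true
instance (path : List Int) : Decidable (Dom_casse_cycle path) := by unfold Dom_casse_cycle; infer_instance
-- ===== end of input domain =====

-- B is index-free: it zips the path with its one-step rotation (built by slicing) into the
-- cycle's edge list, then pairs edges by structural recursion on suffixes (simpler; same output).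

-- ===== PORT A =====
def casse_cycle (path : List Int) : List (List (Int × Int)) :=
  let ncc : Int := (path.length : Int)
  let points : List (Int × Int) :=
    (PySem.List.pyRange 0 (ncc - 1) 1).foldl (fun acc i =>
      (PySem.List.pyRange (i + 1) ncc 1).foldl (fun acc2 j => acc2 ++ [(i, j)]) acc) []
  points.foldl (fun edges p =>
    let edge1 : Int × Int := (PySem.List.pyGetD path p.1 0, PySem.List.pyGetD path (p.1 + 1) 0)
    let edge2 : Int × Int :=
      if p.2 == ncc - 1 then (PySem.List.pyGetD path p.2 0, PySem.List.pyGetD path 0 0)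
      else (PySem.List.pyGetD path p.2 0, PySem.List.pyGetD path (p.2 + 1) 0)
    edges ++ [[edge1, edge2]]) []

-- ===== PORT B =====
-- helper for B: `pairs` — recursion on the suffixes of the edge list
def pvPairsB : List (Int × Int) → List (List (Int × Int))
  | [] => []
  | head :: tail => tail.map (fun e => [head, e]) ++ pvPairsB tail

-- B: edges = list(zip(path, path[1:] + path[:1])); return pairs(edges)
def casse_cycle_alt (path : List Int) : List (List (Int × Int)) :=
  let edges : List (Int × Int) :=
    path.zip (PySem.List.slice path (some 1) none ++ PySem.List.slice path none (some 1))
  pvPairsB edges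

-- ===== PRECONDITION & SPEC =====
def Spec_casse_cycle (path : List Int) (out : List (List (Int × Int))) : Prop := out = casse_cycle_alt path
instance (path : List Int) (out : List (List (Int × Int))) : Decidable (Spec_casse_cycle path out) := by unfold Spec_casse_cycle; infer_instance

-- ===== CLAIM (what is proved, stated in full; the proofs are below) =====
def Claim_equal_casse_cycle : Prop := ∀ (path : List Int), Dom_casse_cycle path → Spec_casse_cycle path (casse_cycle path)

-- ===== LEMMAS AND PROOFS =====

-- the common edge function: edge at index k of the cycle
def pvE (path : List Int) (k : Int) : Int × Int :=
  (PySem.List.pyGetD path k 0,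
   PySem.List.pyGetD path (if k = (path.length : Int) - 1 then 0 else k + 1) 0)

-- pvPairsB over a mapped integer range equals the double-range flatMap
theorem pvPairsB_map_pyRange (E : Int → Int × Int) (a b : Int) :
    pvPairsB ((PySem.List.pyRange a b 1).map E)
      = (PySem.List.pyRange a (b - 1) 1).flatMap (fun i =>
          (PySem.List.pyRange (i + 1) b 1).map (fun j => [E i, E j])) := by
  by_cases hab : b ≤ a
  · rw [PySem.List.pyRange_one_eq_nil hab, PySem.List.pyRange_one_eq_nil (by omega)]
    simp [pvPairsB]
  · replace hab : a < b := by omega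
    have hlt : (b - (a + 1)).toNat < (b - a).toNat := by omega
    rw [PySem.List.pyRange_one_cons hab]
    simp only [List.map_cons, pvPairsB, List.map_map]
    rw [pvPairsB_map_pyRange E (a + 1) b]
    by_cases h1 : a < b - 1
    · rw [PySem.List.pyRange_one_cons h1, List.flatMap_cons]
      rfl
    · have ha : a = b - 1 := by omega
      rw [PySem.List.pyRange_one_eq_nil (by omega), PySem.List.pyRange_one_eq_nil (by omega),
          PySem.List.pyRange_one_eq_nil (by omega)]
      simp
termination_by (b - a).toNat

-- the zipped rotation is the edge table indexed over the range
theorem zip_rot_eq_map_E (path : List Int) :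
    path.zip (PySem.List.slice path (some 1) none ++ PySem.List.slice path none (some 1))
      = (PySem.List.pyRange 0 (path.length : Int) 1).map (pvE path) := by
  rw [PySem.List.slice_from_one, show (some (1:Int)) = some ((1:ℕ):Int) from rfl,
     PySem.List.slice_to_natCast]
  apply List.ext_getElem
  · simp [PySem.List.length_pyRange_one]
    omega
  · intro k h1 h2
    have hk : k < path.length := by
      have h := h1
      simp [List.length_zip] at h
      omega
    simp only [List.getElem_zip, List.getElem_map, PySem.List.getElem_pyRange_one, zero_add]
    have hE : pvE path (k : Int)
        = (PySem.List.pyGetD path (k : Int) 0,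
           PySem.List.pyGetD path (if (k : Int) = (path.length : Int) - 1 then 0 else (k : Int) + 1) 0) := rfl
    rw [hE]
    have hfst : PySem.List.pyGetD path (k : Int) 0 = path[k] := by
      rw [PySem.List.pyGetD_natCast]; simp [hk]
    by_cases hlast : k = path.length - 1
    · have hne : path.length ≠ 0 := by omega
      have : (k : Int) = (path.length : Int) - 1 := by omega
      rw [if_pos this] at hE ⊢
      have h0 : PySem.List.pyGetD path (0 : Int) 0 = path[0]'(by omega) := by
        rw [show ((0:Int)) = ((0:ℕ) : Int) by simp, PySem.List.pyGetD_natCast]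
        simp [Nat.pos_of_ne_zero hne]
      rw [hfst, h0]
      rw [List.getElem_append_right (by simp; omega)]
      simp [hlast]
    · have hk1 : k + 1 < path.length := by omega
      have : ¬ (k : Int) = (path.length : Int) - 1 := by omega
      rw [if_neg this]
      have hsnd : PySem.List.pyGetD path ((k : Int) + 1) 0 = path[k + 1] := by
        rw [show ((k:Int) + 1) = ((k + 1 : ℕ) : Int) by push_cast; ring, PySem.List.pyGetD_natCast]
        simp [hk1]
      rw [hfst, hsnd]
      rw [List.getElem_append_left (by simp; omega)]
      simp

theorem casse_cycle_eq (path : List Int) : casse_cycle path = casse_cycle_alt path := by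
  unfold casse_cycle casse_cycle_alt
  rw [zip_rot_eq_map_E, pvPairsB_map_pyRange]
  simp only [PySem.List.foldl_append_singleton_eq_map, PySem.List.foldl_append_eq_flatMap,
    List.nil_append, List.map_flatMap, List.map_map]
  refine List.flatMap_congr ?_
  intro i hi
  rw [PySem.List.mem_pyRange_one] at hi
  refine List.map_congr_left ?_
  intro j hj
  rw [PySem.List.mem_pyRange_one] at hj
  simp only [Function.comp, pvE]
  have hine : ¬ i = (path.length : Int) - 1 := by omega
  by_cases hj1 : j = (path.length : Int) - 1
  · simp [hj1, hine]
  · simp [hj1, hine]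

-- ===== VERDICT (by name: the statement is the Claim_ definition above) =====
theorem casse_cycle_spec : Claim_equal_casse_cycle := by
  intro path _
  exact casse_cycle_eq path
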